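-- pv_equiv track=rewrite | github.com/UQ-PAC/predicate-simplifier | main.py | combination_generator
-- ===== SOURCE A (Python) =====
-- import itertools
--
-- def combination_generator(variable_encodings, length, dnf_mode: bool):
--     """
--     Generates all combinations of the given terms, as well as their corresponding encodings, of the given length.
--     For example, given the term encodings:
--     {a: 00001111, b: 00110011, c: 01010101}
--     ...with length=2 and dnf_mode=True, will generate:
--     [([a, b], 00000011), ([a, !b], 00001100), ([!a, b], 00110000), ([!a, !b], 11000000), ([a, c], <code>),
--     ([a, !c], <code>), ([!a, c], <code>), ([!a, !c], <code>), ([b, c], <code>), ([b, !c], <code>), ([!b, c], <code>),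
--     ([!b, !c], <code>)]
--
--     :param variable_encodings: A dictionary mapping terms to their encodings.
--     :param length: The length of the returned combinations.
--     :param dnf_mode: dnf_mode=True will return the encodings for the conjunctions of each combination of terms.
--     dnf_mode=False will return the encodings for the disjunctions of each combination of terms.
--     :return: All combinations of the given terms, as well as their corresponding encodings, of the given length.
--     """
--     to_return = []
--     term_combinations = itertools.combinations(variable_encodings.keys(), length)
--     # [(a,b),(a,c),(b,c)] for num_terms=2
--     for combination in term_combinations:
--         # combination = (a,b)
--         for negation_pattern in range(2 ** length):
--             # negation_pattern = 01
--             terms = []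
--             combo_code = 2 ** (2 ** len(variable_encodings)) - 1 if dnf_mode else 0
--             for digit in range(length):
--                 # digit = 0
--                 term = combination[digit]  # a
--                 term_code = variable_encodings[term]
--                 if (negation_pattern >> digit) % 2:
--                     term = '~' + term
--                     term_code = ~term_code
--                 terms.append(term)
--                 combo_code = combo_code & term_code if dnf_mode else combo_code | term_code
--             to_return.append((terms, combo_code))  # ([a, ~b], 0010)
--     return to_return
-- ===== SOURCE B (Python) =====
-- def combination_generator(variable_encodings, length, dnf_mode: bool):
--     init = 2 ** (2 ** len(variable_encodings)) - 1 if dnf_mode else 0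
--
--     def combos(items, k):
--         # recursive k-combinations: take the head or leave it
--         if k == 0:
--             return [[]]
--         if not items:
--             return []
--         head, rest = items[0], items[1:]
--         return [[head] + tail for tail in combos(rest, k - 1)] + combos(rest, k)
--
--     def rows(pairs):
--         # peel the LAST term off and recurse on the prefix: the last position
--         # varies slowest, and the code accumulates prefix-first
--         if not pairs:
--             return [([], init)]
--         prefix, (term, code) = pairs[:-1], pairs[-1]
--         sub = rows(prefix)
--         out = []
--         for t, c in ((term, code), ('~' + term, ~code)):
--             for terms, acc in sub:
--                 out.append((terms + [t], (acc & c) if dnf_mode else (acc | c)))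
--         return out
--
--     result = []
--     for combo in combos(list(variable_encodings.items()), length):
--         result.extend(rows(combo))
--     return result
-- ===== Notes on version B (the rewrite author's own statement) =====
-- stated objective: alternative
-- what changed: Replaces A's itertools.combinations plus integer negation-pattern enumeration (range(2**length) with per-digit bit shifting) by two plain recursions with no bit arithmetic: take-or-leave recursive k-combinations over the (term, code) item pairs, and a polarity expansion that peels the last pair off each combination and folds the &/| code while recursing on the prefix.
-- crash fix: On length < 0, A's itertools.combinations raises ValueError while B's recursive combos finds no combination and returns []. — e.g. on combination_generator([("a", 1)], -1, false): A raises ValueError, B returns []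
import Mathlib
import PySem

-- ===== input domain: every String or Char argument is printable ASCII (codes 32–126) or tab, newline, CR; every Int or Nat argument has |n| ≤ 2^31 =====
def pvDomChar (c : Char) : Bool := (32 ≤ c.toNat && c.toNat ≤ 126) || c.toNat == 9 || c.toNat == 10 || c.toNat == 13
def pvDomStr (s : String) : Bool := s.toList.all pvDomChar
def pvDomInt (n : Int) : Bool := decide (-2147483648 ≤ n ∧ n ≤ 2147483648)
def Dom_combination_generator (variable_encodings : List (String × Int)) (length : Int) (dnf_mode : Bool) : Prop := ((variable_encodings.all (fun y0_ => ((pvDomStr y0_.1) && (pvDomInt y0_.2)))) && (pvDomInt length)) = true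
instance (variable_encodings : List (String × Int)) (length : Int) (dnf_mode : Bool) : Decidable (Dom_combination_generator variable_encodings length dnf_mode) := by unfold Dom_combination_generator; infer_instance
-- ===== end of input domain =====

-- B replaces A's integer negation-pattern enumeration (bit shifts inside a triple loop over
-- itertools.combinations) by two plain recursions: take-or-leave k-combinations over the item
-- pairs, and a polarity expansion that peels the last term off each combination and folds the
-- code as it recurses (objective: alternative decomposition, no bit arithmetic).

-- ===== PORT A =====
-- A, transliterated: dict of encodings, itertools.combinations over the keys, then for each
-- combination an integer negation_pattern in range(2**length) whose bits pick the negated positions.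
def combination_generator (variable_encodings : List (String × Int)) (length : Int) (dnf_mode : Bool) : List (List String × Int) :=
  let d : PySem.Dict String Int := PySem.Dict.ofList variable_encodings
  let term_combinations := PySem.List.combinations d.keys length.toNat
  term_combinations.foldl (fun to_return combination =>
    (PySem.List.pyRange 0 ((2:Int) ^ length.toNat) 1).foldl (fun to_return (negation_pattern : Int) =>
      let res :=
        (PySem.List.pyRange 0 length 1).foldl (fun (st : List String × Int) digit =>
          let term := PySem.List.pyGetD combination digit ""
          let term_code := d.getD term 0
          let tc : String × Int :=
            if PySem.Int.mod (negation_pattern >>> digit.toNat) 2 ≠ 0 then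
              ("~" ++ term, Int.not term_code)
            else (term, term_code)
          (st.1 ++ [tc.1],
           if dnf_mode then PySem.Int.band st.2 tc.2 else PySem.Int.bor st.2 tc.2))
          ([], if dnf_mode then (2:Int) ^ ((2:Nat) ^ d.size) - 1 else 0)
      to_return ++ [res]) to_return) []

-- ===== PORT B =====
-- Source B's combos: recursive take-or-leave k-combinations of the item pairs
def pvCombosB (items : List (String × Int)) (k : Int) : List (List (String × Int)) :=
  if k = 0 then [[]]
  else match items with
    | [] => []
    | head :: rest => ((pvCombosB rest (k - 1)).map (head :: ·)) ++ pvCombosB rest k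
termination_by structural items

-- Source B's rows peels the LAST pair off (pairs[:-1], pairs[-1]) and recurses on the prefix,
-- signs outer, sub-rows inner; ported structurally on the REVERSED list, whose head/tail are
-- exactly pairs[-1] / reversed(pairs[:-1])
def pvRowsBRev (dnf : Bool) (init : Int) : List (String × Int) → List (List String × Int)
  | [] => [([], init)]
  | p :: rev_prefix =>
    [(p.1, p.2), ("~" ++ p.1, Int.not p.2)].flatMap (fun o =>
      (pvRowsBRev dnf init rev_prefix).map (fun r =>
        (r.1 ++ [o.1], if dnf then PySem.Int.band r.2 o.2 else PySem.Int.bor r.2 o.2)))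

def pvRowsB (dnf : Bool) (init : Int) (pairs : List (String × Int)) : List (List String × Int) :=
  pvRowsBRev dnf init pairs.reverse

def combination_generator_alt (variable_encodings : List (String × Int)) (length : Int) (dnf_mode : Bool) : List (List String × Int) :=
  let d : PySem.Dict String Int := PySem.Dict.ofList variable_encodings
  let init : Int := if dnf_mode then (2:Int) ^ ((2:Nat) ^ d.size) - 1 else 0
  (pvCombosB d.items length).foldl (fun result combo => result ++ pvRowsB dnf_mode init combo) []

-- ===== PRECONDITION & SPEC =====
-- Pre_: length must be non-negative — on length < 0 Python's itertools.combinations raises ValueError.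
def Pre_combination_generator (variable_encodings : List (String × Int)) (length : Int) (dnf_mode : Bool) : Prop := 0 ≤ length
instance (variable_encodings : List (String × Int)) (length : Int) (dnf_mode : Bool) : Decidable (Pre_combination_generator variable_encodings length dnf_mode) := by unfold Pre_combination_generator; infer_instance
def pvWitness_combination_generator : (List (String × Int)) × Int × Bool := ([("a", 1), ("b", 3)], 1, true)

-- On length < 0, A's itertools.combinations raises ValueError; B's recursive combos returns no combination, so B returns [].
def Raises_combination_generator (variable_encodings : List (String × Int)) (length : Int) (dnf_mode : Bool) : Prop := length < 0
instance (variable_encodings : List (String × Int)) (length : Int) (dnf_mode : Bool) : Decidable (Raises_combination_generator variable_encodings length dnf_mode) := by unfold Raises_combination_generator; infer_instance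
def pvRaiseWitness_combination_generator : (List (String × Int)) × Int × Bool := ([("a", 1)], -1, false)
def pvRaiseWitnessOut_combination_generator : List (List String × Int) := []

def Spec_combination_generator (variable_encodings : List (String × Int)) (length : Int) (dnf_mode : Bool) (out : List (List String × Int)) : Prop := out = combination_generator_alt variable_encodings length dnf_mode
instance (variable_encodings : List (String × Int)) (length : Int) (dnf_mode : Bool) (out : List (List String × Int)) : Decidable (Spec_combination_generator variable_encodings length dnf_mode out) := by unfold Spec_combination_generator; infer_instance

-- ===== CLAIM (what is proved, stated in full; the proofs are below) =====
def Claim_equal_combination_generator : Prop := ∀ (variable_encodings : List (String × Int)) (length : Int) (dnf_mode : Bool), Dom_combination_generator variable_encodings length dnf_mode → Pre_combination_generator variable_encodings length dnf_mode → Spec_combination_generator variable_encodings length dnf_mode (combination_generator variable_encodings length dnf_mode)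
def Claim_raises_combination_generator : Prop := (∀ (variable_encodings : List (String × Int)) (length : Int) (dnf_mode : Bool), Dom_combination_generator variable_encodings length dnf_mode → Raises_combination_generator variable_encodings length dnf_mode → ¬ Pre_combination_generator variable_encodings length dnf_mode) ∧ (Dom_combination_generator (pvRaiseWitness_combination_generator.1) (pvRaiseWitness_combination_generator.2.1) (pvRaiseWitness_combination_generator.2.2) ∧ Raises_combination_generator (pvRaiseWitness_combination_generator.1) (pvRaiseWitness_combination_generator.2.1) (pvRaiseWitness_combination_generator.2.2) ∧ combination_generator_alt (pvRaiseWitness_combination_generator.1) (pvRaiseWitness_combination_generator.2.1) (pvRaiseWitness_combination_generator.2.2) = pvRaiseWitnessOut_combination_generator)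

-- ===== LEMMAS AND PROOFS =====

-- the row of options A's bit test selects while halving the pattern, position by position
def pvSel (f : String → Int) : List String → Int → List (String × Int)
  | [], _ => []
  | t :: ts, p =>
    (if PySem.Int.mod p 2 ≠ 0 then ("~" ++ t, Int.not (f t)) else (t, f t)) :: pvSel f ts (p >>> (1:Nat))

-- all rows for a combination, position 0 varying fastest
def pvRowsG {α β : Type} (pf : α → List β) : List α → List (List β)
  | [] => [[]]
  | t :: ts => (pvRowsG pf ts).flatMap (fun s => (pf t).map (· :: s))

theorem nat_range_double (m : Nat) :
    List.range (2 * m) = (List.range m).flatMap (fun q => [2 * q, 2 * q + 1]) := by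
  induction m with
  | zero => simp
  | succ m ih =>
    have : 2 * (m + 1) = (2 * m + 1) + 1 := by ring
    rw [this, List.range_succ, List.range_succ, ih, List.range_succ]
    simp

theorem pv_range_double (m : Nat) :
    PySem.List.pyRange 0 ((2:Int) ^ (m + 1)) 1
      = (PySem.List.pyRange 0 ((2:Int) ^ m) 1).flatMap (fun q => [2 * q, 2 * q + 1]) := by
  have h1 : ((2:Int) ^ (m+1)) = ((2 ^ (m+1) : Nat) : Int) := by push_cast; ring
  have h2 : ((2:Int) ^ m) = ((2 ^ m : Nat) : Int) := by push_cast; ring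
  rw [h1, h2, PySem.List.pyRange_one, PySem.List.pyRange_one]
  simp only [sub_zero, Int.toNat_natCast, zero_add]
  have : (2:Nat) ^ (m+1) = 2 * 2 ^ m := by ring
  rw [this, nat_range_double, List.flatMap_map, List.map_flatMap]
  apply List.flatMap_congr
  intro x _
  simp

theorem pvSel_even (f : String → Int) (c : List String) (t : String) (q : Int) :
    pvSel f (t :: c) (2 * q) = (t, f t) :: pvSel f c q := by
  have h2 : (2 * q) >>> (1:Nat) = q := by rw [Int.shiftRight_eq_div_pow]; omega
  simp [pvSel, h2]

theorem pvSel_odd (f : String → Int) (c : List String) (t : String) (q : Int) :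
    pvSel f (t :: c) (2 * q + 1) = ("~" ++ t, Int.not (f t)) :: pvSel f c q := by
  have h2 : (2 * q + 1) >>> (1:Nat) = q := by rw [Int.shiftRight_eq_div_pow]; omega
  simp [pvSel, h2]

theorem pvSel_range_eq_rows (f : String → Int) (c : List String) :
    (PySem.List.pyRange 0 ((2:Int) ^ c.length) 1).map (pvSel f c)
      = pvRowsG (fun t => [(t, f t), ("~" ++ t, Int.not (f t))]) c := by
  induction c with
  | nil =>
    simp only [List.length_nil, pow_zero]
    rw [show PySem.List.pyRange 0 1 1 = [(0:Int)] from by decide]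
    simp [pvSel, pvRowsG]
  | cons t ts ih =>
    rw [List.length_cons, pv_range_double, List.map_flatMap, pvRowsG, ← ih, List.flatMap_map]
    apply List.flatMap_congr
    intro q _
    simp [pvSel_even, pvSel_odd]

theorem pv_shift_add (p : Int) (k : Nat) : p >>> (1 + k) = (p >>> (1:Nat)) >>> k := by
  rw [Int.shiftRight_eq_div_pow, Int.shiftRight_eq_div_pow, Int.shiftRight_eq_div_pow,
    Int.ediv_ediv_of_nonneg]
  · norm_num [pow_succ, pow_zero, pow_add, mul_comm]
  · positivity

theorem pv_inner_fold (f : String → Int) (op : Int → Int → Int) :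
    ∀ (c : List String) (p : Int) (acc : List String × Int),
    (PySem.List.pyRange 0 ((c.length : Int)) 1).foldl (fun (st : List String × Int) digit =>
        let term := PySem.List.pyGetD c digit ""
        let term_code := f term
        let tc : String × Int :=
          if PySem.Int.mod (p >>> digit.toNat) 2 ≠ 0 then ("~" ++ term, Int.not term_code)
          else (term, term_code)
        (st.1 ++ [tc.1], op st.2 tc.2)) acc
      = (acc.1 ++ (pvSel f c p).map Prod.fst, ((pvSel f c p).map Prod.snd).foldl op acc.2) := by
  intro c
  induction c with
  | nil =>
    intro p acc
    rw [List.length_nil, Int.natCast_zero, PySem.List.pyRange_one_eq_nil (by norm_num)]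
    simp [pvSel]
  | cons t ts ih =>
    intro p acc
    have hpos : (0:Int) < (((t :: ts).length : Nat) : Int) := by exact_mod_cast Nat.succ_pos ts.length
    rw [PySem.List.pyRange_one_cons hpos, List.foldl_cons]
    simp only [PySem.List.pyGetD_zero_cons, Int.toNat_zero, Int.shiftRight_zero]
    have ihp := ih (p >>> (1:Nat))
      ((acc.1 ++ [((if PySem.Int.mod p 2 ≠ 0 then ("~" ++ t, Int.not (f t)) else (t, f t)) : String × Int).1]),
        op acc.2 ((if PySem.Int.mod p 2 ≠ 0 then ("~" ++ t, Int.not (f t)) else (t, f t)) : String × Int).2)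
    rw [PySem.List.pyRange_one] at ihp ⊢
    simp only [zero_add, sub_zero, Int.toNat_natCast] at ihp ⊢
    have hn1 : ((((t :: ts).length : Nat) : Int) - 1).toNat = ts.length := by
      simp [List.length_cons]
    rw [hn1]
    rw [List.foldl_map] at ihp ⊢
    refine Eq.trans (PySem.List.foldl_congr_mem _ _ _ _ ?_) (ihp.trans ?_)
    · intro st k _
      have e1 : PySem.List.pyGetD (t :: ts) (1 + (k:Int)) "" = PySem.List.pyGetD ts ((k:Int)) "" := by
        have h : (1 + (k:Int)) = ((k+1 : Nat) : Int) := by push_cast; ring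
        rw [h, PySem.List.pyGetD_natCast, PySem.List.pyGetD_natCast]
        simp
      have e2 : p >>> (1 + (k:Int)).toNat = (p >>> (1:Nat)) >>> k := by
        have h : (1 + (k:Int)).toNat = 1 + k := by omega
        rw [h, pv_shift_add]
      simp [e1, e2]
    · simp [pvSel, List.append_assoc]

-- per-combination equality of A's pattern loop with the abstract rows, position 0 fastest
theorem pv_row_eq (d : PySem.Dict String Int) (op : Int → Int → Int) (init : Int) (L : Nat)
    (c : List String) (hclen : c.length = L) :
    (PySem.List.pyRange 0 ((2:Int) ^ L) 1).map (fun (negation_pattern : Int) =>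
      (PySem.List.pyRange 0 ((L : Nat) : Int) 1).foldl (fun (st : List String × Int) digit =>
        let term := PySem.List.pyGetD c digit ""
        let term_code := d.getD term 0
        let tc : String × Int :=
          if PySem.Int.mod (negation_pattern >>> digit.toNat) 2 ≠ 0 then
            ("~" ++ term, Int.not term_code)
          else (term, term_code)
        (st.1 ++ [tc.1], op st.2 tc.2)) ([], init))
    = (pvRowsG (fun t => [(t, d.getD t 0), ("~" ++ t, Int.not (d.getD t 0))]) c).map
        (fun s => (s.map Prod.fst, (s.map Prod.snd).foldl op init)) := by
  subst hclen
  have hA : ∀ p : Int,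
      (PySem.List.pyRange 0 ((c.length : Nat) : Int) 1).foldl (fun (st : List String × Int) digit =>
        let term := PySem.List.pyGetD c digit ""
        let term_code := d.getD term 0
        let tc : String × Int :=
          if PySem.Int.mod (p >>> digit.toNat) 2 ≠ 0 then
            ("~" ++ term, Int.not term_code)
          else (term, term_code)
        (st.1 ++ [tc.1], op st.2 tc.2)) ([], init)
      = ((pvSel (fun t => d.getD t 0) c p).map Prod.fst,
          ((pvSel (fun t => d.getD t 0) c p).map Prod.snd).foldl op init) := by
    intro p
    rw [pv_inner_fold (fun t => d.getD t 0) op c p ([], init)]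
    simp
  simp only [hA]
  rw [← pvSel_range_eq_rows (fun t => d.getD t 0) c, List.map_map]
  rfl

-- snoc form of pvRowsG: the last position varies slowest
theorem pvRowsG_concat {α β : Type} (pf : α → List β) (ts : List α) (t : α) :
    pvRowsG pf (ts ++ [t]) = (pf t).flatMap (fun o => (pvRowsG pf ts).map (· ++ [o])) := by
  induction ts with
  | nil => simp [pvRowsG, ← List.map_eq_flatMap]
  | cons x xs ih =>
    rw [List.cons_append]
    simp only [pvRowsG, ih, List.flatMap_assoc, List.map_flatMap, List.flatMap_map]
    apply List.flatMap_congr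
    intro o _
    simp [Function.comp_def]

-- snoc equation of B's rows
theorem pvRowsB_concat (dnf : Bool) (init : Int) (ps : List (String × Int)) (p : String × Int) :
    pvRowsB dnf init (ps ++ [p])
      = [(p.1, p.2), ("~" ++ p.1, Int.not p.2)].flatMap (fun o =>
          (pvRowsB dnf init ps).map (fun r =>
            (r.1 ++ [o.1], if dnf then PySem.Int.band r.2 o.2 else PySem.Int.bor r.2 o.2))) := by
  unfold pvRowsB
  rw [List.reverse_append]
  simp [pvRowsBRev]

-- B's rows equal the abstract rows with the code folded left over the selected codes
theorem pvRowsB_eq (dnf : Bool) (init : Int) (f : String → Int) (op : Int → Int → Int)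
    (hop : ∀ a b : Int, (if dnf then PySem.Int.band a b else PySem.Int.bor a b) = op a b)
    (cp : List (String × Int)) (hf : ∀ p ∈ cp, f p.1 = p.2) :
    pvRowsB dnf init cp
      = (pvRowsG (fun t => [(t, f t), ("~" ++ t, Int.not (f t))]) (cp.map Prod.fst)).map
          (fun s => (s.map Prod.fst, (s.map Prod.snd).foldl op init)) := by
  induction cp using List.reverseRecOn with
  | nil => simp [pvRowsB, pvRowsBRev, pvRowsG]
  | append_singleton ps p ih =>
    have hp : f p.1 = p.2 := hf p (by simp)
    have hps : ∀ q ∈ ps, f q.1 = q.2 := fun q hq => hf q (by simp [hq])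
    rw [pvRowsB_concat, List.map_append, List.map_cons, List.map_nil, pvRowsG_concat,
      ih hps, List.map_flatMap]
    simp only [hp]
    apply List.flatMap_congr
    intro o _
    rw [List.map_map, List.map_map]
    apply List.map_congr_left
    intro s _
    simp [hop, List.foldl_append]

-- Source B's recursive combos are itertools.combinations for non-negative k
theorem pvCombosB_eq (l : List (String × Int)) : ∀ (k : Int), 0 ≤ k →
    pvCombosB l k = PySem.List.combinations l k.toNat := by
  induction l with
  | nil =>
    intro k hk
    rw [pvCombosB]
    by_cases h : k = 0
    · simp [h, PySem.List.combinations_zero]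
    · have : k.toNat = (k.toNat - 1) + 1 := by omega
      rw [if_neg h, this, PySem.List.combinations_nil_succ]
  | cons x xs ih =>
    intro k hk
    rw [pvCombosB]
    by_cases h : k = 0
    · simp [h, PySem.List.combinations_zero]
    · have hsub : k.toNat = (k - 1).toNat + 1 := by omega
      rw [if_neg h, ih (k - 1) (by omega), ih k hk, hsub, PySem.List.combinations_cons_succ,
        ← hsub]

-- ===== VERDICT (by name: the statement is the Claim_ definition above) =====
theorem combination_generator_spec : Claim_equal_combination_generator := by
  intro ve len dnf _ hpre
  unfold Spec_combination_generator combination_generator combination_generator_alt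
  simp only [PySem.List.foldl_append_singleton_eq_map]
  rw [PySem.List.foldl_append_eq_flatMap, PySem.List.foldl_append_eq_flatMap,
    List.nil_append, List.nil_append, pvCombosB_eq _ len hpre]
  have hkeys : (PySem.Dict.ofList ve).keys = (PySem.Dict.ofList ve).items.map Prod.fst := rfl
  rw [hkeys, PySem.List.combinations_map, List.flatMap_map]
  apply List.flatMap_congr
  intro cp hcp
  have hclen : (cp.map Prod.fst).length = len.toNat := by
    rw [List.length_map]; exact PySem.List.length_of_mem_combinations hcp
  have hf : ∀ p ∈ cp, (PySem.Dict.ofList ve).getD p.1 0 = p.2 := by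
    intro p hp
    have hmem : p ∈ (PySem.Dict.ofList ve).items :=
      (PySem.List.sublist_of_mem_combinations hcp).mem hp
    exact PySem.Dict.getD_of_mem_items _ hmem (PySem.Dict.nodup_keys_ofList ve) 0
  have hlen : len = ((len.toNat : Nat) : Int) := (Int.toNat_of_nonneg hpre).symm
  rw [hlen]
  cases dnf with
  | false =>
    have h := pv_row_eq (PySem.Dict.ofList ve) PySem.Int.bor 0 len.toNat (cp.map Prod.fst) hclen
    simp only [Bool.false_eq_true, if_false, Int.toNat_natCast]
    rw [h, pvRowsB_eq false 0 (fun t => (PySem.Dict.ofList ve).getD t 0) PySem.Int.bor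
      (fun a b => rfl) cp hf]
  | true =>
    have h := pv_row_eq (PySem.Dict.ofList ve)
      PySem.Int.band ((2:Int) ^ ((2:Nat) ^ (PySem.Dict.ofList ve).size) - 1) len.toNat
      (cp.map Prod.fst) hclen
    simp only [if_true, Int.toNat_natCast]
    rw [h, pvRowsB_eq true _ (fun t => (PySem.Dict.ofList ve).getD t 0) PySem.Int.band
      (fun a b => rfl) cp hf]

def combination_generator_raises : Claim_raises_combination_generator := by
  unfold Claim_raises_combination_generator
  refine ⟨fun ve len dnf _ hr hp => ?_, by decide⟩
  exact absurd hp (by unfold Pre_combination_generator Raises_combination_generator at *; omega)
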